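-- pv_equiv track=rewrite | github.com/edgesentry/mpol-analysis | scripts/sync_r2.py | _region_filter_names
-- ===== SOURCE A (Python) =====
-- _REGION_PREFIX: dict[str, str] = {
--     "singapore": "singapore",
--     "japan": "japansea",
--     "middleeast": "middleeast",
--     "europe": "europe",
--     "persiangulf": "persiangulf",
--     "gulfofguinea": "gulfofguinea",
--     "gulfofaden": "gulfofaden",
--     "gulfofmexico": "gulfofmexico",
-- }
--
-- _SHARED_FILES = {
--     "mpol.duckdb",
--     "candidate_watchlist.parquet",
--     "causal_effects.parquet",
--     "validation_metrics.json",
-- }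
--
-- def _region_filter_names(names: list[str], regions: list[str]) -> list[str]:
--     """Filter zip entry names to shared files + per-region files only."""
--     prefixes = tuple(f"{_REGION_PREFIX[r]}_" for r in regions)
--     stems = tuple(f"{_REGION_PREFIX[r]}." for r in regions)
--     result = []
--     for name in names:
--         top = name.split("/")[0]
--         if top in _SHARED_FILES:
--             result.append(name)
--         elif any(top.startswith(p) for p in prefixes):
--             result.append(name)
--         elif any(top.startswith(s) for s in stems):
--             result.append(name)
--     return result
-- ===== SOURCE B (Python) =====
-- _REGION_PREFIX: dict[str, str] = {
--     "singapore": "singapore",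
--     "japan": "japansea",
--     "middleeast": "middleeast",
--     "europe": "europe",
--     "persiangulf": "persiangulf",
--     "gulfofguinea": "gulfofguinea",
--     "gulfofaden": "gulfofaden",
--     "gulfofmexico": "gulfofmexico",
-- }
--
-- _SHARED_FILES = {
--     "mpol.duckdb",
--     "candidate_watchlist.parquet",
--     "causal_effects.parquet",
--     "validation_metrics.json",
-- }
--
--
-- def _region_filter_names(names: list[str], regions: list[str]) -> list[str]:
--     """Filter zip entry names to shared files + per-region files only."""
--     allowed = {_REGION_PREFIX[r] for r in regions}
--
--     def keep(name: str) -> bool: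
--         top = name.split("/")[0]
--         if top in _SHARED_FILES:
--             return True
--         for i, ch in enumerate(top):
--             if ch == "_" or ch == ".":
--                 return top[:i] in allowed
--         return False
--
--     return [n for n in names if keep(n)]
-- ===== Notes on version B (the rewrite author's own statement) =====
-- stated objective: idiomatic
-- what changed: Instead of scanning every region prefix and stem per name, B builds the allowed-prefix set once and parses each name's top component up to its first '_' or '.', keeping the name when the token before the separator is in the set.
import Mathlib
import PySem

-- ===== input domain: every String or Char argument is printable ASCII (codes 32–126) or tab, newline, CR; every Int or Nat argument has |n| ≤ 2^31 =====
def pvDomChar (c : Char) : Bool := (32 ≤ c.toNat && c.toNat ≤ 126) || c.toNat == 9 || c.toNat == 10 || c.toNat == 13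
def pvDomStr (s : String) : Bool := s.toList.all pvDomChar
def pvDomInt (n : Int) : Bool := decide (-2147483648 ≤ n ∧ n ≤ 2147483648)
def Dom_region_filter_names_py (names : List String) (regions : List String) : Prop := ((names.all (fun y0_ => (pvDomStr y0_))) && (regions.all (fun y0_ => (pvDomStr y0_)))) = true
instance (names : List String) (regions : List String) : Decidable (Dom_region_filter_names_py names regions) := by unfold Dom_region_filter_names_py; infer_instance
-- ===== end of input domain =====

-- B replaces A's per-name scan over region prefixes/stems by one allowed-prefix set and a
-- single parse of the top component up to its first '_' or '.' (objective: idiomatic).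

-- ===== PORT A =====
def pvRegionDict : PySem.Dict String String := PySem.Dict.ofList
  [("singapore", "singapore"), ("japan", "japansea"), ("middleeast", "middleeast"),
   ("europe", "europe"), ("persiangulf", "persiangulf"), ("gulfofguinea", "gulfofguinea"),
   ("gulfofaden", "gulfofaden"), ("gulfofmexico", "gulfofmexico")]

def pvSharedFiles : PySem.Set String := PySem.Set.ofList
  ["mpol.duckdb", "candidate_watchlist.parquet", "causal_effects.parquet", "validation_metrics.json"]

def region_filter_names_py (names : List String) (regions : List String) : List String :=
  let prefixes := regions.map (fun r => (PySem.Dict.getD pvRegionDict r "") ++ "_")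
  let stems := regions.map (fun r => (PySem.Dict.getD pvRegionDict r "") ++ ".")
  names.foldl (fun result name =>
    let top := ((PySem.Str.split? name "/").getD []).headD ""
    if PySem.Set.contains pvSharedFiles top then result ++ [name]
    else if prefixes.any (fun p => PySem.Str.startswith top p) then result ++ [name]
    else if stems.any (fun s => PySem.Str.startswith top s) then result ++ [name]
    else result) []

-- ===== PORT B =====
-- port of B's `for i, ch in enumerate(top): if ch == "_" or ch == ".": return top[:i] in allowed`
-- as structural recursion returning the token before the first separator (none = no separator)
def pvCutToken? : List Char → Option (List Char)
  | [] => none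
  | c :: cs => if c = '_' ∨ c = '.' then some [] else (pvCutToken? cs).map (c :: ·)

def pvKeepB (allowed : PySem.Set String) (name : String) : Bool :=
  let top := ((PySem.Str.split? name "/").getD []).headD ""
  if PySem.Set.contains pvSharedFiles top then true
  else
    match pvCutToken? top.toList with
    | some tok => PySem.Set.contains allowed (String.ofList tok)
    | none => false

def region_filter_names_py_alt (names : List String) (regions : List String) : List String :=
  let allowed := PySem.Set.ofList (regions.map (fun r => PySem.Dict.getD pvRegionDict r ""))
  names.filter (pvKeepB allowed)

-- ===== PRECONDITION & SPEC =====
-- Pre_ excludes regions that are not keys of _REGION_PREFIX: there A raises KeyError.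
def Pre_region_filter_names_py (names : List String) (regions : List String) : Prop :=
  ∀ r ∈ regions, PySem.Dict.contains pvRegionDict r = true

instance (names : List String) (regions : List String) : Decidable (Pre_region_filter_names_py names regions) := by unfold Pre_region_filter_names_py; infer_instance

def pvWitness_region_filter_names_py : List String × List String :=
  (["mpol.duckdb", "singapore_ships.parquet", "japansea.json", "europe/x", "other.txt"], ["singapore", "japan"])

def Spec_region_filter_names_py (names : List String) (regions : List String) (out : List String) : Prop := out = region_filter_names_py_alt names regions
instance (names : List String) (regions : List String) (out : List String) : Decidable (Spec_region_filter_names_py names regions out) := by unfold Spec_region_filter_names_py; infer_instance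

-- ===== CLAIM =====
def Claim_equal_region_filter_names_py : Prop := ∀ (names : List String) (regions : List String), Dom_region_filter_names_py names regions → Pre_region_filter_names_py names regions → Spec_region_filter_names_py names regions (region_filter_names_py names regions)

-- ===== LEMMAS AND PROOFS =====

-- A's three-branch appending fold is a filter by the disjunction of the three tests
lemma pv_foldl_three_if (P Q R : String → Bool) (l acc : List String) :
    l.foldl (fun res x => if P x then res ++ [x] else if Q x then res ++ [x] else if R x then res ++ [x] else res) acc
      = acc ++ l.filter (fun x => P x || Q x || R x) := by
  induction l generalizing acc with
  | nil => simp
  | cons x xs ih =>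
    by_cases hP : P x <;> by_cases hQ : Q x <;> by_cases hR : R x <;>
      simp [List.foldl_cons, hP, hQ, hR, ih]

def pvSepFree (l : List Char) : Prop := ∀ x ∈ l, ¬(x = '_' ∨ x = '.')

lemma pv_cutToken_sound (t tok : List Char) (h : pvCutToken? t = some tok) :
    ∃ c rest, t = tok ++ c :: rest ∧ (c = '_' ∨ c = '.') ∧ pvSepFree tok := by
  induction t generalizing tok with
  | nil => simp [pvCutToken?] at h
  | cons c cs ih =>
    by_cases hc : c = '_' ∨ c = '.'
    · simp [pvCutToken?, hc] at h
      subst h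
      exact ⟨c, cs, rfl, hc, by simp [pvSepFree]⟩
    · simp [pvCutToken?, hc] at h
      obtain ⟨tok', h', rfl⟩ := h
      obtain ⟨d, rest, rfl, hd, hfree⟩ := ih tok' h'
      refine ⟨d, rest, by simp, hd, ?_⟩
      intro x hx
      rcases List.mem_cons.mp hx with rfl | hx
      · exact hc
      · exact hfree x hx

lemma pv_cutToken_complete (p : List Char) (c : Char) (rest : List Char)
    (hfree : pvSepFree p) (hc : c = '_' ∨ c = '.') :
    pvCutToken? (p ++ c :: rest) = some p := by
  induction p with
  | nil => simp [pvCutToken?, hc]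
  | cons a as ih =>
    have ha : ¬(a = '_' ∨ a = '.') := hfree a (List.mem_cons_self ..)
    have has : pvSepFree as := fun x hx => hfree x (List.mem_cons_of_mem _ hx)
    simp [pvCutToken?, ha, ih has]

lemma pv_region_sepFree (r : String) (h : PySem.Dict.contains pvRegionDict r = true) :
    pvSepFree (PySem.Dict.getD pvRegionDict r "").toList := by
  have hk : r ∈ PySem.Dict.keys pvRegionDict := (PySem.Dict.contains_iff_mem_keys _ _).mp h
  have hkeys : PySem.Dict.keys pvRegionDict = ["singapore", "japan", "middleeast", "europe",
      "persiangulf", "gulfofguinea", "gulfofaden", "gulfofmexico"] := by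
    simp [pvRegionDict, PySem.Dict.ofList, PySem.Dict.update, PySem.Dict.keys,
      PySem.Dict.insert, PySem.Dict.empty, PySem.Dict.contains]
  rw [hkeys] at hk
  unfold pvSepFree
  fin_cases hk <;>
    simp [pvRegionDict, PySem.Dict.ofList, PySem.Dict.update, PySem.Dict.insert,
      PySem.Dict.empty, PySem.Dict.getD, PySem.Dict.get?]

-- if top starts with p followed by a separator char (and p is separator-free),
-- then B's parse of top yields exactly p
lemma pv_prefix_cut (top p suffix : String) (c : Char) (hsuf : suffix.toList = [c])
    (hfree : pvSepFree p.toList) (hc : c = '_' ∨ c = '.')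
    (hsw : PySem.Str.startswith top (p ++ suffix) = true) :
    pvCutToken? top.toList = some p.toList := by
  rw [PySem.Str.startswith_eq, PySem.Chars.startswith_iff] at hsw
  obtain ⟨rest, hrest⟩ := hsw
  rw [String.toList_append, hsuf, List.append_assoc] at hrest
  rw [← hrest]
  exact pv_cutToken_complete _ _ _ hfree hc

-- per-name agreement of the two non-shared tests, under Pre_
lemma pv_core (top : String) (regions : List String)
    (hreg : ∀ r ∈ regions, PySem.Dict.contains pvRegionDict r = true) :
    ((regions.map (fun r => (PySem.Dict.getD pvRegionDict r "") ++ "_")).any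
        (fun p => PySem.Str.startswith top p)
      || (regions.map (fun r => (PySem.Dict.getD pvRegionDict r "") ++ ".")).any
        (fun s => PySem.Str.startswith top s))
      = (match pvCutToken? top.toList with
         | some tok => PySem.Set.contains
             (PySem.Set.ofList (regions.map (fun r => PySem.Dict.getD pvRegionDict r ""))) (String.ofList tok)
         | none => false) := by
  rcases hcut : pvCutToken? top.toList with _ | tok
  · -- no separator in top: both any-tests are false
    rw [Bool.or_eq_false_iff]
    constructor <;>
    · rw [List.any_eq_false]
      intro p hp
      rw [List.mem_map] at hp
      obtain ⟨r, hr, rfl⟩ := hp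
      intro hsw
      first
      | have := pv_prefix_cut top _ "_" '_' (by decide) (pv_region_sepFree r (hreg r hr)) (Or.inl rfl) hsw
      | have := pv_prefix_cut top _ "." '.' (by decide) (pv_region_sepFree r (hreg r hr)) (Or.inr rfl) hsw
      rw [hcut] at this
      simp at this
  · rw [Bool.eq_iff_iff]
    simp only [Bool.or_eq_true, List.any_eq_true, List.mem_map]
    rw [PySem.Set.contains_iff, PySem.Set.mem_ofList, List.mem_map]
    obtain ⟨c, rest, htop, hc, hfree⟩ := pv_cutToken_sound _ _ hcut
    constructor
    · rintro (⟨p, ⟨r, hr, rfl⟩, hsw⟩ | ⟨p, ⟨r, hr, rfl⟩, hsw⟩)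
      · have := pv_prefix_cut top _ "_" '_' (by decide) (pv_region_sepFree r (hreg r hr)) (Or.inl rfl) hsw
        rw [hcut] at this
        have htok := Option.some.inj this
        exact ⟨r, hr, by rw [htok, String.ofList_toList]⟩
      · have := pv_prefix_cut top _ "." '.' (by decide) (pv_region_sepFree r (hreg r hr)) (Or.inr rfl) hsw
        rw [hcut] at this
        have htok := Option.some.inj this
        exact ⟨r, hr, by rw [htok, String.ofList_toList]⟩
    · rintro ⟨r, hr, hEq⟩
      have htok : (PySem.Dict.getD pvRegionDict r "").toList = tok := by
        rw [hEq]; simp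
      rcases hc with rfl | rfl
      · refine Or.inl ⟨(PySem.Dict.getD pvRegionDict r "") ++ "_", ⟨r, hr, rfl⟩, ?_⟩
        rw [PySem.Str.startswith_eq, PySem.Chars.startswith_iff]
        exact ⟨rest, by simp [String.toList_append, htok, htop]⟩
      · refine Or.inr ⟨(PySem.Dict.getD pvRegionDict r "") ++ ".", ⟨r, hr, rfl⟩, ?_⟩
        rw [PySem.Str.startswith_eq, PySem.Chars.startswith_iff]
        exact ⟨rest, by simp [String.toList_append, htok, htop]⟩

-- ===== VERDICT =====
theorem region_filter_names_py_spec : Claim_equal_region_filter_names_py := by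
  intro names regions _ hpre
  unfold Spec_region_filter_names_py region_filter_names_py region_filter_names_py_alt
  rw [pv_foldl_three_if]
  rw [List.nil_append]
  apply List.filter_congr
  intro name _
  unfold pvKeepB
  by_cases hsh : PySem.Set.contains pvSharedFiles (((PySem.Str.split? name "/").getD []).headD "") <;>
    simp only [hsh, Bool.true_or, if_true, Bool.false_or]
  exact pv_core _ regions hpre
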